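-- pv_equiv track=rewrite | github.com/wkid-neu/GHP-FPGA-CNN | Python/be/helper.py | conv_params_alignment
-- ===== SOURCE A (Python) =====
-- from typing import Tuple
--
-- def conv_params_alignment(OC, INC, KH, KW, M, S) -> Tuple[int, int]:  # aligned_OC, aligned_INC
--     """Parameters aligment for Conv."""
--     # OC must be multiple of 2M
--     if OC%(M*2) != 0:
--         aligned_OC = (OC//(M*2)+1)*(M*2)
--     else:
--         aligned_OC = OC
--     # INC must be multiple of S
--     # Vector size must be a multiple of 8
--     # Vector size must be larger than M.
--     aligned_INC = INC
--     while (aligned_INC*KH*KW < M) or ((aligned_INC*KH*KW)%8 != 0) or (aligned_INC%S != 0):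
--         aligned_INC += 1
--     return aligned_OC, aligned_INC
-- ===== SOURCE B (Python) =====
-- from math import gcd
--
-- def conv_params_alignment(OC, INC, KH, KW, M, S):
--     # OC: smallest multiple of 2M that is >= OC (ceiling division, no branch)
--     d = M * 2
--     aligned_OC = -((-OC) // d) * d
--     # INC: smallest x >= INC with x*K >= M, 8 | x*K and S | x, where K = KH*KW > 0.
--     # 8 | x*K  <=>  (8 // gcd(K, 8)) | x, so x must be a multiple of
--     # L = lcm(8 // gcd(K, 8), |S|) and at least max(INC, ceil(M/K)).
--     K = KH * KW
--     p = 8 // gcd(K, 8)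
--     a = abs(S)
--     L = p * a // gcd(p, a)
--     lo = max(INC, -((-M) // K))
--     aligned_INC = -((-lo) // L) * L
--     return aligned_OC, aligned_INC
-- ===== Notes on version B (the rewrite author's own statement) =====
-- stated objective: faster
-- what changed: A's unit-step while loop searching for aligned_INC is replaced by a closed form (ceiling to the next multiple of lcm(8//gcd(K,8), |S|) at or above max(INC, ceil(M/K))), and A's branchy OC alignment by a single ceiling division; Pre_ excludes M=0 and S=0 (A raises ZeroDivisionError) and KH*KW<=0, where A's loop diverges on all but accidental inputs.
-- outside the precondition, e.g. on conv_params_alignment(0, 0, -1, 1, -10, 1): A returns (0, 0), B returns (0, 16)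
import Mathlib
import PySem

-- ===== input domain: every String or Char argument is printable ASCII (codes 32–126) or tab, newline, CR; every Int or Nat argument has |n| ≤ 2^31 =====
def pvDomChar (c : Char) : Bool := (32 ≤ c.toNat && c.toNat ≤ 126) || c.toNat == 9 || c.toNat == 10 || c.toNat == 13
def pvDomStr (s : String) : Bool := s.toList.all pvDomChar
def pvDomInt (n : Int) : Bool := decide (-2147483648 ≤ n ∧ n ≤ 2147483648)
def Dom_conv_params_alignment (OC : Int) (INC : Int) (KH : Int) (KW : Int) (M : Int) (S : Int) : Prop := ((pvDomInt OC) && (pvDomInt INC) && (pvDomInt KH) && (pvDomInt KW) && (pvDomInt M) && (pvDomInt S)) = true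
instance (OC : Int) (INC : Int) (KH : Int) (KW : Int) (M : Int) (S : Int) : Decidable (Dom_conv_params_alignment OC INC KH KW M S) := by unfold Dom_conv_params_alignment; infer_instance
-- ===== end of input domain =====

-- B replaces A's unit-step search for aligned_INC by a closed form (ceiling to the next
-- multiple of lcm(8 / gcd(K,8), |S|)) and A's OC branch by one ceiling division.

-- ===== PORT A =====
-- A's while loop, transliterated; the fuel argument only guards totality
-- (under Pre_ it provably exceeds the number of iterations the Python loop makes).
def loopA (K M S : Int) : Nat → Int → Int
  | 0, x => x
  | fuel+1, x =>
    if x * K < M ∨ PySem.Int.mod (x * K) 8 ≠ 0 ∨ PySem.Int.mod x S ≠ 0 then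
      loopA K M S fuel (x + 1)
    else x

def conv_params_alignment (OC : Int) (INC : Int) (KH : Int) (KW : Int) (M : Int) (S : Int) : Int × Int :=
  let alignedOC :=
    if PySem.Int.mod OC (M * 2) ≠ 0 then (PySem.Int.floordiv OC (M * 2) + 1) * (M * 2) else OC
  let K := KH * KW
  -- fuel: an upper bound on the iteration count (totality guard only; the loop body is A's)
  let fuel := (max INC (-(PySem.Int.floordiv (-M) K)) - INC + 8 * |S| + 1).toNat
  (alignedOC, loopA K M S fuel INC)

-- ===== PORT B =====
def conv_params_alignment_alt (OC : Int) (INC : Int) (KH : Int) (KW : Int) (M : Int) (S : Int) : Int × Int :=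
  let d := M * 2
  let alignedOC := -(PySem.Int.floordiv (-OC) d) * d
  let K := KH * KW
  let p := PySem.Int.floordiv 8 (Int.gcd K 8 : Int)
  let a := |S|
  let L := PySem.Int.floordiv (p * a) (Int.gcd p a : Int)
  let lo := max INC (-(PySem.Int.floordiv (-M) K))
  (alignedOC, -(PySem.Int.floordiv (-lo) L) * L)

-- ===== PRECONDITION & SPEC =====
-- Pre_ excludes M = 0 and S = 0 (Python A raises ZeroDivisionError there) and KH*KW ≤ 0,
-- where A's while loop diverges on all but accidental inputs (e.g. on (0,0,-1,1,-10,1) it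
-- happens to return at once); B assumes the natural domain of a positive kernel.
def Pre_conv_params_alignment (OC : Int) (INC : Int) (KH : Int) (KW : Int) (M : Int) (S : Int) : Prop :=
  M ≠ 0 ∧ S ≠ 0 ∧ 0 < KH * KW
instance (OC : Int) (INC : Int) (KH : Int) (KW : Int) (M : Int) (S : Int) : Decidable (Pre_conv_params_alignment OC INC KH KW M S) := by unfold Pre_conv_params_alignment; infer_instance

def pvWitness_conv_params_alignment : Int × Int × Int × Int × Int × Int := (16, 3, 3, 3, 16, 4)

def Spec_conv_params_alignment (OC : Int) (INC : Int) (KH : Int) (KW : Int) (M : Int) (S : Int) (out : Int × Int) : Prop := out = conv_params_alignment_alt OC INC KH KW M S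
instance (OC : Int) (INC : Int) (KH : Int) (KW : Int) (M : Int) (S : Int) (out : Int × Int) : Decidable (Spec_conv_params_alignment OC INC KH KW M S out) := by unfold Spec_conv_params_alignment; infer_instance

-- ===== CLAIM (what is proved, stated in full; the proofs are below) =====
def Claim_equal_conv_params_alignment : Prop := ∀ (OC : Int) (INC : Int) (KH : Int) (KW : Int) (M : Int) (S : Int), Dom_conv_params_alignment OC INC KH KW M S → Pre_conv_params_alignment OC INC KH KW M S → Spec_conv_params_alignment OC INC KH KW M S (conv_params_alignment OC INC KH KW M S)

-- ===== LEMMAS AND PROOFS =====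

-- ceiling bracket for  -((-a) // b)  with b > 0
theorem pv_ceil_bracket (a b : Int) (hb : 0 < b) :
    (-(PySem.Int.floordiv (-a) b) - 1) * b < a ∧ a ≤ -(PySem.Int.floordiv (-a) b) * b :=
  (PySem.Int.neg_floordiv_neg_eq_iff_of_pos (a := a) (b := b)
    (q := -(PySem.Int.floordiv (-a) b)) hb).mp rfl

-- A's branchy OC alignment equals B's ceiling formula, for a positive divisor
theorem pv_alignOC_pos (OC d : Int) (hd : 0 < d) :
    (if PySem.Int.mod OC d ≠ 0 then (PySem.Int.floordiv OC d + 1) * d else OC)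
      = -(PySem.Int.floordiv (-OC) d) * d := by
  have hqr := PySem.Int.floordiv_mul_add_mod OC d
  have hr0 := PySem.Int.mod_nonneg OC hd
  have hrd := PySem.Int.mod_lt OC hd
  split_ifs with h
  · have h2 : -(PySem.Int.floordiv (-OC) d) = PySem.Int.floordiv OC d + 1 :=
      (PySem.Int.neg_floordiv_neg_eq_iff_of_pos hd).mpr
        ⟨by nlinarith [lt_of_le_of_ne hr0 (Ne.symm h)], by nlinarith⟩
    rw [h2]
  · push_neg at h
    have h2 : -(PySem.Int.floordiv (-OC) d) = PySem.Int.floordiv OC d :=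
      (PySem.Int.neg_floordiv_neg_eq_iff_of_pos hd).mpr ⟨by nlinarith, by nlinarith⟩
    rw [h2]; linarith [hqr, h]

-- ... and for every nonzero divisor
theorem pv_alignOC (OC d : Int) (hd : d ≠ 0) :
    (if PySem.Int.mod OC d ≠ 0 then (PySem.Int.floordiv OC d + 1) * d else OC)
      = -(PySem.Int.floordiv (-OC) d) * d := by
  rcases lt_or_gt_of_ne hd with hneg | hpos
  · have he : 0 < -d := by omega
    have key := pv_alignOC_pos (-OC) (-d) he
    have hm : PySem.Int.mod OC d = -PySem.Int.mod (-OC) (-d) := by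
      have := PySem.Int.mod_neg_neg (-OC) (-d); simpa using this.symm
    have hf1 : PySem.Int.floordiv OC d = PySem.Int.floordiv (-OC) (-d) := by
      have := PySem.Int.floordiv_neg_neg (-OC) (-d); simpa using this.symm
    have hf2 : PySem.Int.floordiv (-OC) d = PySem.Int.floordiv OC (-d) := by
      have := PySem.Int.floordiv_neg_neg OC (-d); simpa using this
    simp only [neg_neg] at key
    rw [hm, hf1, hf2]
    simp only [neg_ne_zero]
    split_ifs at key ⊢ with h
    · linarith [key]
    · linarith [key]
  · exact pv_alignOC_pos OC d hpos

-- 8 ∣ a*b ↔ (8 / gcd b 8) ∣ a, Nat version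
theorem pv_nat_eight_dvd (a b : Nat) : 8 ∣ a * b ↔ (8 / Nat.gcd b 8) ∣ a := by
  have hg : 0 < Nat.gcd b 8 := Nat.gcd_pos_of_pos_right _ (by norm_num)
  have hb : Nat.gcd b 8 * (b / Nat.gcd b 8) = b := Nat.mul_div_cancel' (Nat.gcd_dvd_left b 8)
  have h8 : Nat.gcd b 8 * (8 / Nat.gcd b 8) = 8 := Nat.mul_div_cancel' (Nat.gcd_dvd_right b 8)
  have hco : (8 / Nat.gcd b 8).Coprime (b / Nat.gcd b 8) := (Nat.coprime_div_gcd_div_gcd hg).symm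
  constructor
  · intro h
    have h' : Nat.gcd b 8 * (8 / Nat.gcd b 8) ∣ Nat.gcd b 8 * (a * (b / Nat.gcd b 8)) := by
      rw [h8, show Nat.gcd b 8 * (a * (b / Nat.gcd b 8))
            = a * (Nat.gcd b 8 * (b / Nat.gcd b 8)) by ring, hb]
      exact h
    exact hco.dvd_of_dvd_mul_right ((Nat.mul_dvd_mul_iff_left hg).mp h')
  · intro h
    have h' : Nat.gcd b 8 * (8 / Nat.gcd b 8) ∣ b * a := mul_dvd_mul (Nat.gcd_dvd_left b 8) h
    rw [h8] at h'
    rwa [Nat.mul_comm b a] at h'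

-- Int version in the shape the ports use
theorem pv_eight_dvd (x K : Int) :
    (8 : Int) ∣ x * K ↔ ((8 / Nat.gcd K.natAbs 8 : Nat) : Int) ∣ x := by
  rw [Int.ofNat_dvd_left, show (8:Int) = ((8:Nat):Int) from rfl, Int.ofNat_dvd_left,
    Int.natAbs_mul]
  exact pv_nat_eight_dvd x.natAbs K.natAbs

-- the loop returns the first point ≥ its start where the condition fails
theorem pv_loopA_reaches (K M S v : Int)
    (hv : ¬(v * K < M ∨ PySem.Int.mod (v * K) 8 ≠ 0 ∨ PySem.Int.mod v S ≠ 0)) :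
    ∀ (fuel : Nat) (x : Int), x ≤ v → (v - x).toNat < fuel →
    (∀ y, x ≤ y → y < v → (y * K < M ∨ PySem.Int.mod (y * K) 8 ≠ 0 ∨ PySem.Int.mod y S ≠ 0)) →
    loopA K M S fuel x = v := by
  intro fuel
  induction fuel with
  | zero => intro x hx hf _; omega
  | succ n ih =>
    intro x hx hf hmin
    rw [loopA]
    by_cases hxv : x = v
    · subst hxv; rw [if_neg hv]
    · have hlt : x < v := lt_of_le_of_ne hx hxv
      rw [if_pos (hmin x le_rfl hlt)]
      exact ih (x + 1) (by omega) (by omega) (fun y hy hyv => hmin y (by omega) hyv)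

-- ===== VERDICT (by name: the statement is the Claim_ definition above) =====
theorem conv_params_alignment_spec : Claim_equal_conv_params_alignment := by
  intro OC INC KH KW M S _ hpre
  obtain ⟨hM, hS, hK⟩ := hpre
  unfold Spec_conv_params_alignment
  simp only [conv_params_alignment, conv_params_alignment_alt]
  rw [Prod.mk.injEq]
  refine ⟨pv_alignOC OC (M * 2) (by omega), ?_⟩
  -- names
  set K := KH * KW with hKdef
  set c := -(PySem.Int.floordiv (-M) K) with hcdef
  set lo := max INC c with hlodef
  -- B's modulus L is the lcm
  set pn : Nat := 8 / Nat.gcd K.natAbs 8 with hpndef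
  set an : Nat := S.natAbs with handef
  have hp : PySem.Int.floordiv 8 (Int.gcd K 8 : Int) = (pn : Int) := by
    exact_mod_cast PySem.Int.floordiv_natCast 8 (Nat.gcd K.natAbs 8)
  have ha : |S| = (an : Int) := Int.abs_eq_natAbs S
  rw [hp, ha]
  have hgpa : (Int.gcd (pn : Int) (an : Int) : Int) = ((Nat.gcd pn an : Nat) : Int) := by
    rw [Int.gcd_natCast_natCast]
  have hL : PySem.Int.floordiv ((pn : Int) * (an : Int)) (Int.gcd (pn : Int) (an : Int) : Int)
      = ((Nat.lcm pn an : Nat) : Int) := by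
    rw [hgpa, show ((pn : Int) * (an : Int)) = ((pn * an : Nat) : Int) by push_cast; ring]
    exact_mod_cast PySem.Int.floordiv_natCast (pn * an) (Nat.gcd pn an)
  rw [hL]
  set L : Int := ((Nat.lcm pn an : Nat) : Int) with hLdef
  -- positivity
  have hpn_pos : 0 < pn := Nat.div_pos
    (Nat.le_of_dvd (by norm_num) (Nat.gcd_dvd_right K.natAbs 8))
    (Nat.gcd_pos_of_pos_right _ (by norm_num))
  have han_pos : 0 < an := Int.natAbs_pos.mpr hS
  have hLpos : 0 < L := by rw [hLdef]; exact_mod_cast Nat.lcm_pos hpn_pos han_pos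
  -- divisibility characterisation
  have hdvd : ∀ x : Int, L ∣ x ↔ ((pn : Int) ∣ x ∧ S ∣ x) := by
    intro x
    rw [hLdef, Int.ofNat_dvd_left, Nat.lcm_dvd_iff, ← Int.ofNat_dvd_left,
      ← Int.ofNat_dvd_left, handef, Int.natAbs_dvd]
  -- ceiling facts
  have hc := pv_ceil_bracket M K hK
  rw [← hcdef] at hc
  have hMle : ∀ x : Int, M ≤ x * K ↔ c ≤ x := by
    intro x
    constructor
    · intro h
      by_contra hcx
      push_neg at hcx
      have : x * K ≤ (c - 1) * K := mul_le_mul_of_nonneg_right (by omega) (le_of_lt hK)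
      linarith [hc.1]
    · intro h
      have : c * K ≤ x * K := mul_le_mul_of_nonneg_right h (le_of_lt hK)
      linarith [hc.2]
  -- the loop condition fails exactly on { x | c ≤ x ∧ L ∣ x }
  have hcond : ∀ x : Int,
      ¬(x * K < M ∨ PySem.Int.mod (x * K) 8 ≠ 0 ∨ PySem.Int.mod x S ≠ 0)
        ↔ (c ≤ x ∧ L ∣ x) := by
    intro x
    rw [hdvd]
    simp only [not_or, not_lt, ne_eq, not_not]
    rw [PySem.Int.mod_eq_zero_iff_dvd, PySem.Int.mod_eq_zero_iff_dvd,
      pv_eight_dvd x K, ← hpndef, ← hMle]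
  -- B's result v
  set q := -(PySem.Int.floordiv (-lo) L) with hqdef
  have hv := pv_ceil_bracket lo L hLpos
  rw [← hqdef] at hv
  have hloINC : INC ≤ lo := le_max_left _ _
  have hloc : c ≤ lo := le_max_right _ _
  have hvINC : INC ≤ q * L := le_trans hloINC hv.2
  -- the loop condition fails at v = q*L
  have hPv : ¬(q * L * K < M ∨ PySem.Int.mod (q * L * K) 8 ≠ 0 ∨ PySem.Int.mod (q * L) S ≠ 0) := by
    rw [hcond]
    exact ⟨le_trans hloc hv.2, dvd_mul_left L q⟩
  -- minimality: below q*L (and ≥ INC) the condition holds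
  have hmin : ∀ y, INC ≤ y → y < q * L →
      (y * K < M ∨ PySem.Int.mod (y * K) 8 ≠ 0 ∨ PySem.Int.mod y S ≠ 0) := by
    intro y hy hyv
    by_contra hcf
    rw [hcond] at hcf
    obtain ⟨hcy, m, hm⟩ := hcf
    have hloy : lo ≤ y := max_le hy hcy
    rw [mul_comm L m] at hm
    subst hm
    have a1 : q - 1 < m := lt_of_mul_lt_mul_right (by linarith [hv.1]) (le_of_lt hLpos)
    have a2 : m < q := lt_of_mul_lt_mul_right hyv (le_of_lt hLpos)
    omega
  -- fuel suffices
  have hLle : L ≤ 8 * (an : Int) := by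
    have h1 : Nat.lcm pn an ≤ pn * an :=
      Nat.le_of_dvd (Nat.mul_pos hpn_pos han_pos)
        (Nat.lcm_dvd (dvd_mul_right pn an) (dvd_mul_left an pn))
    have h2 : pn * an ≤ 8 * an := Nat.mul_le_mul_right an (Nat.div_le_self 8 _)
    rw [hLdef]
    exact_mod_cast le_trans h1 h2
  have hfuel : (q * L - INC).toNat < (lo - INC + 8 * (an : Int) + 1).toNat := by
    have : q * L < lo + L := by linarith [hv.1]
    omega
  exact pv_loopA_reaches K M S (q * L) hPv _ INC hvINC hfuel hmin
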